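-- pv_equiv track=rewrite | github.com/honu-shell-utions/python | sandbox/project_euler/151-200/188_hyperexponentiation.py | tetration
-- ===== SOURCE A (Python) =====
-- def tetration(base, n):
--     """ Tetration, ^nx, by loop over decreasing exponent counter. """
--     if n == 0:
--         return 1
--     new_base = base
--     while n > 1:
--         new_base = pow(base,new_base,10**8)
--         n -= 1
--     return new_base
-- ===== SOURCE B (Python) =====
-- def tetration(base, n):
--     """Tetration mod 10**8, via cycle detection on f(x) = pow(base, x, 10**8):
--     record each orbit value's first index; on a repeat, jump the remaining
--     iterations with modular arithmetic instead of performing them."""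
--     if n == 0:
--         return 1
--     steps = n - 1
--     seen = {}
--     vals = []
--     x = base
--     i = 0
--     while i < steps:
--         if x in seen:
--             start = seen[x]
--             rem = (steps - start) % (i - start)
--             return vals[start + rem]
--         seen[x] = i
--         vals.append(x)
--         x = pow(base, x, 10**8)
--         i += 1
--     return x
-- ===== Notes on version B (the rewrite author's own statement) =====
-- stated objective: faster
-- what changed: A performs n-1 modular exponentiations in a row; B detects the fixed point / cycle of the orbit x -> pow(base, x, 10**8) with a first-seen index map and jumps the remaining iterations by reducing the remaining count modulo the cycle length.
import Mathlib
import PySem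

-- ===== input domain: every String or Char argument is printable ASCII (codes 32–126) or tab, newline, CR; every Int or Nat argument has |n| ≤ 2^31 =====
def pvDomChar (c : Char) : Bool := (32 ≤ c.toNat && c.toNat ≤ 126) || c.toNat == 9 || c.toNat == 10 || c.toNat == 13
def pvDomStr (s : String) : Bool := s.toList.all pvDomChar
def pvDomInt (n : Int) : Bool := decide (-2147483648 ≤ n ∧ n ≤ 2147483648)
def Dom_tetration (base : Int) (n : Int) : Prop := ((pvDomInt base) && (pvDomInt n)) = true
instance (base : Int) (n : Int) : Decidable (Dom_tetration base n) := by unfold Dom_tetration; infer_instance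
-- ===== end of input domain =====

-- B replaces A's loop of n-1 modular exponentiations by cycle detection on the orbit of
-- x ↦ pow(base, x, 10^8), jumping the remaining iterations modulo the cycle length (faster).

-- ===== PORT A =====
-- Hand port of Python's three-arg pow for the calls this file makes (modulus 10^8, positive):
-- binary exponentiation, reducing mod m at each step; exact for e ≥ 0 and, for e < 0, equal to
-- Python's value whenever gcd(b, 10^8) = 1 (the inverse is taken as b^(φ(10^8)-1) mod 10^8,
-- Euler's theorem) — Pre_tetration admits exactly the inputs on which Python's pow returns.
def pvPowmod (b : Int) (e : Nat) (m : Int) : Int :=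
  if e = 0 then 1 % m
  else
    let h := pvPowmod b (e / 2) m
    let h2 := h * h % m
    if e % 2 = 1 then h2 * b % m else h2
termination_by e
decreasing_by omega

def pvPyPow (b : Int) (e : Int) (m : Int) : Int :=
  if e < 0 then pvPowmod (pvPowmod b 39999999 m) (-e).toNat m
  else pvPowmod b e.toNat m

def tetrationLoop (base : Int) (newBase : Int) (n : Int) : Int :=
  if 1 < n then tetrationLoop base (pvPyPow base newBase 100000000) (n - 1) else newBase
termination_by n.toNat
decreasing_by omega

def tetration (base : Int) (n : Int) : Int :=
  if n = 0 then 1 else tetrationLoop base base n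

-- ===== PORT B =====
def tetrationAltLoop (base : Int) (steps : Int) (seen : PySem.Dict Int Int)
    (vals : List Int) (x : Int) (i : Int) : Int :=
  if i < steps then
    match seen.get? x with
    | some start =>
      let rem := PySem.Int.mod (steps - start) (i - start)
      -- vals[start + rem]: index provably in range on every reachable state
      (PySem.List.pyGet? vals (start + rem)).getD 0
    | none =>
      tetrationAltLoop base steps (seen.insert x i) (vals ++ [x])
        (pvPyPow base x 100000000) (i + 1)
  else x
termination_by (steps - i).toNat
decreasing_by omega

def tetration_alt (base : Int) (n : Int) : Int :=
  if n = 0 then 1 else tetrationAltLoop base (n - 1) PySem.Dict.empty [] base 0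

-- ===== PRECONDITION & SPEC =====
-- Pre_ excludes exactly the inputs on which Python A raises ValueError: n ≥ 2 with a negative
-- base that is not invertible mod 10^8 (base even or divisible by 5), where the first
-- pow(base, base, 10**8) has a negative exponent and no modular inverse exists.
def Pre_tetration (base : Int) (n : Int) : Prop :=
  2 ≤ n → (0 ≤ base ∨ (¬ (2 ∣ base) ∧ ¬ (5 ∣ base)))
instance (base : Int) (n : Int) : Decidable (Pre_tetration base n) := by
  unfold Pre_tetration; infer_instance

def pvWitness_tetration : Int × Int := (3, 4)

def Spec_tetration (base : Int) (n : Int) (out : Int) : Prop := out = tetration_alt base n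
instance (base : Int) (n : Int) (out : Int) : Decidable (Spec_tetration base n out) := by
  unfold Spec_tetration; infer_instance

-- ===== CLAIM (what is proved, stated in full; the proofs are below) =====
def Claim_equal_tetration : Prop := ∀ (base : Int) (n : Int), Dom_tetration base n → Pre_tetration base n → Spec_tetration base n (tetration base n)

-- ===== LEMMAS AND PROOFS =====

-- the orbit step both programs iterate
def pvF (base : Int) : Int → Int := fun x => pvPyPow base x 100000000

theorem tetrationLoop_eq_iterate (base : Int) :
    ∀ (k : Nat) (n nb : Int), (n - 1).toNat = k →
      tetrationLoop base nb n = (pvF base)^[k] nb := by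
  intro k
  induction k with
  | zero =>
    intro n nb hk
    rw [tetrationLoop]
    have : ¬ 1 < n := by omega
    simp [this]
  | succ k ih =>
    intro n nb hk
    rw [tetrationLoop]
    have h1 : 1 < n := by omega
    simp only [h1, if_pos]
    rw [ih (n - 1) _ (by omega), Function.iterate_succ_apply]
    rfl

theorem iterate_period {α : Type} (f : α → α) (x : α) (s p : Nat) (hp : 0 < p)
    (hcyc : f^[s + p] x = f^[s] x) :
    ∀ m, s ≤ m → f^[m] x = f^[s + (m - s) % p] x := by
  intro m
  induction m using Nat.strong_induction_on with
  | _ m ih =>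
    intro hsm
    by_cases hlt : m < s + p
    · have : (m - s) % p = m - s := Nat.mod_eq_of_lt (by omega)
      rw [this]
      congr 1
      omega
    · have hm : s ≤ m - p := by omega
      have hstep : f^[m] x = f^[m - p] x := by
        conv_lhs => rw [show m = (m - s - p) + (s + p) by omega]
        rw [Function.iterate_add_apply, hcyc, ← Function.iterate_add_apply]
        congr 1
        omega
      rw [hstep, ih (m - p) (by omega) hm]
      have : m - s = (m - p - s) + p := by omega
      rw [this, Nat.add_mod_right]

theorem altLoop_eq (base steps : Int) (hsteps : 0 ≤ steps) :
    ∀ (fuel : Nat) (i : Int) (seen : PySem.Dict Int Int) (vals : List Int),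
      (steps - i).toNat = fuel → 0 ≤ i → i ≤ steps →
      (∀ v s, seen.get? v = some s → 0 ≤ s ∧ s < i ∧ (pvF base)^[s.toNat] base = v) →
      vals = (List.range i.toNat).map (fun j => (pvF base)^[j] base) →
      tetrationAltLoop base steps seen vals ((pvF base)^[i.toNat] base) i
        = (pvF base)^[steps.toNat] base := by
  intro fuel
  induction fuel with
  | zero =>
    intro i seen vals hfuel h0i his hseen hvals
    have hi : i = steps := by omega
    rw [tetrationAltLoop]
    simp [hi]
  | succ fuel ih =>
    intro i seen vals hfuel h0i his hseen hvals
    rw [tetrationAltLoop]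
    have hlt : i < steps := by omega
    simp only [hlt, if_pos]
    cases hget : seen.get? ((pvF base)^[i.toNat] base) with
    | none =>
      show tetrationAltLoop base steps (seen.insert ((pvF base)^[i.toNat] base) i)
          (vals ++ [(pvF base)^[i.toNat] base])
          (pvPyPow base ((pvF base)^[i.toNat] base) 100000000) (i + 1)
          = (pvF base)^[steps.toNat] base
      have hx : pvPyPow base ((pvF base)^[i.toNat] base) 100000000
          = (pvF base)^[(i + 1).toNat] base := by
        rw [show (i + 1).toNat = i.toNat + 1 by omega, Function.iterate_succ_apply']
        rfl
      rw [hx]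
      apply ih (i + 1) _ _ (by omega) (by omega) (by omega)
      · intro v s hv
        rw [PySem.Dict.get?_insert] at hv
        split at hv
        · rename_i hvx
          obtain rfl : s = i := by injection hv with h; omega
          exact ⟨h0i, by omega, by rw [hvx]⟩
        · obtain ⟨a, b, c⟩ := hseen v s hv
          exact ⟨a, by omega, c⟩
      · rw [hvals, show (i + 1).toNat = i.toNat + 1 by omega, List.range_succ, List.map_append]
        rfl
    | some start =>
      obtain ⟨hs0, hsi, hsval⟩ := hseen _ _ hget
      show (PySem.List.pyGet? vals (start + PySem.Int.mod (steps - start) (i - start))).getD 0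
          = (pvF base)^[steps.toNat] base
      have hp : (0 : Int) < i - start := by omega
      have hrem_eq : PySem.Int.mod (steps - start) (i - start)
          = (steps - start) % (i - start) := PySem.Int.mod_eq_emod_of_pos hp
      have hrem0 : 0 ≤ (steps - start) % (i - start) := Int.emod_nonneg _ (by omega)
      have hremlt : (steps - start) % (i - start) < i - start := Int.emod_lt_of_pos _ hp
      have hcast : (steps - start) % (i - start)
          = (((steps.toNat - start.toNat) % (i.toNat - start.toNat) : Nat) : Int) := by
        rw [show steps - start = ((steps.toNat - start.toNat : Nat) : Int) by omega,
            show i - start = ((i.toNat - start.toNat : Nat) : Int) by omega]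
        exact (Int.natCast_mod _ _).symm
      have hcyc : (pvF base)^[start.toNat + (i.toNat - start.toNat)] base
          = (pvF base)^[start.toNat] base := by
        rw [show start.toNat + (i.toNat - start.toNat) = i.toNat by omega, hsval]
      have hper := iterate_period (pvF base) base start.toNat (i.toNat - start.toNat)
        (by omega) hcyc steps.toNat (by omega)
      rw [hrem_eq]
      have hidx0 : 0 ≤ start + (steps - start) % (i - start) := by omega
      rw [PySem.List.pyGet?_of_nonneg _ hidx0]
      have hlen : vals.length = i.toNat := by
        rw [hvals, List.length_map, List.length_range]
      have hidxlt : (start + (steps - start) % (i - start)).toNat < i.toNat := by omega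
      rw [hvals, List.getElem?_map, List.getElem?_range hidxlt]
      simp only [Option.map_some, Option.getD_some]
      rw [hper]
      congr 1
      generalize hN : (steps.toNat - start.toNat) % (i.toNat - start.toNat) = N at hcast ⊢
      generalize hM : (steps - start) % (i - start) = M at hcast hrem0 ⊢
      omega

theorem tetration_eq_alt (base n : Int) : tetration base n = tetration_alt base n := by
  unfold tetration tetration_alt
  by_cases h0 : n = 0
  · simp [h0]
  · simp only [h0, if_false]
    rw [tetrationLoop_eq_iterate base (n - 1).toNat n base rfl]
    by_cases h1 : 1 ≤ n - 1
    · have := altLoop_eq base (n - 1) (by omega) (n - 1 - 0).toNat 0 PySem.Dict.empty []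
        rfl (by omega) (by omega)
        (by intro v s hv; simp [PySem.Dict.get?_empty] at hv)
        (by simp)
      simpa using this.symm
    · -- n ≤ 1 (and n ≠ 0): both sides return base without iterating
      have hz : (n - 1).toNat = 0 := by omega
      have h2 : ¬ 1 < n := by omega
      have h3 : ¬ (0 : Int) < n - 1 := by omega
      rw [tetrationAltLoop]
      simp [hz, h2]

-- ===== VERDICT (by name: the statement is the Claim_ definition above) =====
theorem tetration_spec : Claim_equal_tetration := by
  intro base n _ _
  unfold Spec_tetration
  exact tetration_eq_alt base n
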